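-- pv_equiv track=rewrite | github.com/aidos-lab/diffusion-condensation-filtrations | basic_functions.py | BarCodesUpdate
-- ===== SOURCE A (Python) =====
-- def BarCodesUpdate(simplex_list,time_list,simplex_t,time_t):
--     index_list=[]
--     N_l=len(simplex_list)
--     N_t=len(simplex_t)
--     for z in range(0,N_t):
--         if simplex_t[z] not in simplex_list:
--             simplex_list.append(simplex_t[z])
--             time_list.append([time_t])
--         else:
--             index_=simplex_list.index(simplex_t[z])
--             index_list.append(index_)
--             time_=time_list[index_]
--             if len(time_)%2==0:
--                 time_list_new=time_list[index_]
--                 time_list_new.append(time_t)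
--                 time_list[index_]=time_list_new
--     for v in range(0,N_l):
--         if v not in index_list:
--             time_=time_list[v]
--             if len(time_)%2!=0:
--                 time_list_new=time_list[v]
--                 time_list_new.append(time_t-1)
--                 time_list[v]=time_list_new
--     return simplex_list,time_list
-- ===== SOURCE B (Python) =====
-- # B: different decomposition — one direct pass over the original simplices, opening or
-- # closing each barcode by membership of its simplex in simplex_t, then a second pass
-- # appending the genuinely new simplices. Mutates simplex_list/time_list in place like A.
-- def BarCodesUpdate(simplex_list, time_list, simplex_t, time_t):
--     N_l = len(simplex_list)
--     for v in range(N_l):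
--         if simplex_list[v] in simplex_t:
--             if len(time_list[v]) % 2 == 0:
--                 time_list[v].append(time_t)
--         else:
--             if len(time_list[v]) % 2 == 1:
--                 time_list[v].append(time_t - 1)
--     for s in simplex_t:
--         if s not in simplex_list:
--             simplex_list.append(s)
--             time_list.append([time_t])
--     return simplex_list, time_list
-- ===== Notes on version B (the rewrite author's own statement) =====
-- stated objective: alternative
-- what changed: A interleaves matching and appending in one pass over simplex_t plus a closing pass over recorded indices; B does one direct pass over the original simplices (membership in simplex_t decides open/close in place) and then a separate pass over simplex_t appending only the genuinely new simplices. …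
-- outside the precondition, e.g. on BarCodesUpdate([[], []], [[], []], [[]], 2): A returns ([[], []], [[2], []]), B returns ([[], []], [[2], [2]]); on BarCodesUpdate([], [[]], [[0], [0]], 2): A returns ([[0]], [[2], [2]]), B returns ([[0]], [[], [2]])
import Mathlib
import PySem

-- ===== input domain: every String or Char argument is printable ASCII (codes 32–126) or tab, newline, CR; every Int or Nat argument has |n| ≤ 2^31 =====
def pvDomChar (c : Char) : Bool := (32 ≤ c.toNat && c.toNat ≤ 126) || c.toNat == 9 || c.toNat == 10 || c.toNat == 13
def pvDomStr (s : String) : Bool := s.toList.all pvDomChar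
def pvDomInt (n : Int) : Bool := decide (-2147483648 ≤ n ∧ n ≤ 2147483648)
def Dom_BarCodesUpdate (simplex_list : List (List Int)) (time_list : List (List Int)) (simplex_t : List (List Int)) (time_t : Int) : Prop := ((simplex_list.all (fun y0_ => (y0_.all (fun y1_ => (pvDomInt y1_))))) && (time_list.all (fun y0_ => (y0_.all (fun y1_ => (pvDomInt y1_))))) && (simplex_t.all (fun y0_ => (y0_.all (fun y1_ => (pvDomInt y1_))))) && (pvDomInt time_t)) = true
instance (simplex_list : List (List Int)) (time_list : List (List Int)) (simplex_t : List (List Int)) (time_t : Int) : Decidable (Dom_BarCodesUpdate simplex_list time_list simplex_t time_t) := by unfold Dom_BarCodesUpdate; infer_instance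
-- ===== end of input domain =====

-- B differs from A by decomposition: one direct pass over the original simplices (open/close
-- against membership in simplex_t), then a separate pass appending the new simplices.
-- Both Pythons mutate simplex_list/time_list in place; the equivalence is about the return value.

-- ===== PORT A =====
-- first loop body of A (state: simplex_list, time_list, index_list)
def aStep (time_t : Int) (st : List (List Int) × List (List Int) × List Nat) (s : List Int) :
    List (List Int) × List (List Int) × List Nat :=
  let (sl, tl, il) := st
  if s ∉ sl then
    (sl ++ [s], tl ++ [[time_t]], il)
  else
    let i := (PySem.List.index? sl s).getD 0
    let il := il ++ [i]
    let time_ := tl.getD i []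
    if time_.length % 2 = 0 then
      (sl, tl.set i (time_ ++ [time_t]), il)
    else
      (sl, tl, il)

-- second loop body of A (index_list fixed)
def aStep2 (time_t : Int) (il : List Nat) (tl : List (List Int)) (v : Nat) : List (List Int) :=
  if v ∉ il then
    let time_ := tl.getD v []
    if time_.length % 2 ≠ 0 then tl.set v (time_ ++ [time_t - 1]) else tl
  else tl

def BarCodesUpdate (simplex_list : List (List Int)) (time_list : List (List Int)) (simplex_t : List (List Int)) (time_t : Int) : List (List Int) × List (List Int) :=
  let N_l := simplex_list.length
  let st := simplex_t.foldl (aStep time_t) (simplex_list, time_list, ([] : List Nat))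
  let tl2 := (List.range N_l).foldl (aStep2 time_t st.2.2) st.2.1
  (st.1, tl2)

-- ===== PORT B =====
-- B's first pass body: open/close the barcode of original index v by membership in simplex_t
def bStep1 (simplex_t simplex_list : List (List Int)) (time_t : Int)
    (tl : List (List Int)) (v : Nat) : List (List Int) :=
  if simplex_list.getD v [] ∈ simplex_t then
    if (tl.getD v []).length % 2 = 0 then tl.set v (tl.getD v [] ++ [time_t]) else tl
  else
    if (tl.getD v []).length % 2 = 1 then tl.set v (tl.getD v [] ++ [time_t - 1]) else tl

-- B's second pass body: append genuinely new simplices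
def bStep2 (time_t : Int) (st : List (List Int) × List (List Int)) (s : List Int) :
    List (List Int) × List (List Int) :=
  if s ∉ st.1 then (st.1 ++ [s], st.2 ++ [[time_t]]) else st

def BarCodesUpdate_alt (simplex_list : List (List Int)) (time_list : List (List Int)) (simplex_t : List (List Int)) (time_t : Int) : List (List Int) × List (List Int) :=
  let N_l := simplex_list.length
  let tl1 := (List.range N_l).foldl (bStep1 simplex_t simplex_list time_t) time_list
  simplex_t.foldl (bStep2 time_t) (simplex_list, tl1)

-- ===== PRECONDITION & SPEC =====
-- Pre_ excludes inputs where time_list is shorter than simplex_list (A raises IndexError),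
-- inputs where a simplex occurring in simplex_t is duplicated in simplex_list (A's
-- first-index matching there is accidental), and inputs where time_list is strictly longer
-- and a simplex new to simplex_list repeats in simplex_t (A then writes into a time entry
-- belonging to no simplex).
def Pre_BarCodesUpdate (simplex_list : List (List Int)) (time_list : List (List Int)) (simplex_t : List (List Int)) (time_t : Int) : Prop :=
  simplex_list.length ≤ time_list.length ∧
    (simplex_list.filter (fun s => decide (s ∈ simplex_t))).Nodup ∧
    (time_list.length = simplex_list.length ∨
      (simplex_t.filter (fun s => decide (s ∉ simplex_list))).Nodup)
instance (simplex_list : List (List Int)) (time_list : List (List Int)) (simplex_t : List (List Int)) (time_t : Int) : Decidable (Pre_BarCodesUpdate simplex_list time_list simplex_t time_t) := by unfold Pre_BarCodesUpdate; infer_instance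

def pvWitness_BarCodesUpdate : List (List Int) × List (List Int) × List (List Int) × Int :=
  ([[0], [1, 2]], [[3], [4, 5]], [[1, 2], [7]], 9)

def Spec_BarCodesUpdate (simplex_list : List (List Int)) (time_list : List (List Int)) (simplex_t : List (List Int)) (time_t : Int) (out : List (List Int) × List (List Int)) : Prop := out = BarCodesUpdate_alt simplex_list time_list simplex_t time_t
instance (simplex_list : List (List Int)) (time_list : List (List Int)) (simplex_t : List (List Int)) (time_t : Int) (out : List (List Int) × List (List Int)) : Decidable (Spec_BarCodesUpdate simplex_list time_list simplex_t time_t out) := by unfold Spec_BarCodesUpdate; infer_instance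

-- ===== CLAIM (what is proved, stated in full; the proofs are below) =====
def Claim_equal_BarCodesUpdate : Prop := ∀ (simplex_list : List (List Int)) (time_list : List (List Int)) (simplex_t : List (List Int)) (time_t : Int), Dom_BarCodesUpdate simplex_list time_list simplex_t time_t → Pre_BarCodesUpdate simplex_list time_list simplex_t time_t → Spec_BarCodesUpdate simplex_list time_list simplex_t time_t (BarCodesUpdate simplex_list time_list simplex_t time_t)


-- ===== LEMMAS AND PROOFS =====

def nsF (sl : List (List Int)) (ts ns : List (List Int)) : List (List Int) :=
  ts.foldl (fun ns s => if s ∈ sl ∨ s ∈ ns then ns else ns ++ [s]) ns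

def tlStep (sl : List (List Int)) (tt : Int) (tl : List (List Int)) (s : List Int) : List (List Int) :=
  if s ∈ sl then
    let i := (PySem.List.index? sl s).getD 0
    let e := tl.getD i []
    if e.length % 2 = 0 then tl.set i (e ++ [tt]) else tl
  else tl

def tlF (sl : List (List Int)) (tt : Int) (ts tl : List (List Int)) : List (List Int) :=
  ts.foldl (tlStep sl tt) tl

abbrev mtchP (sl ts : List (List Int)) (v : Nat) : Prop :=
  ∃ s ∈ ts, s ∈ sl ∧ (PySem.List.index? sl s).getD 0 = v

theorem getD_set_lem (l : List (List Int)) (i w : Nat) (e : List Int) :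
    (l.set i e).getD w [] = if i = w ∧ i < l.length then e else l.getD w [] := by
  simp only [List.getD_eq_getElem?_getD, List.getElem?_set]
  split_ifs with h1 h2 h3 h3 <;> simp_all <;> omega

theorem index?_append_not_mem {α : Type} [BEq α] [LawfulBEq α] (l t : List α) (v : α)
    (h : v ∉ l) : PySem.List.index? (l ++ t) v = (PySem.List.index? t v).map (l.length + ·) := by
  induction l with
  | nil => simp [Option.map_id']
  | cons x l ih =>
      have hx : x ≠ v := by intro he; exact h (by simp [he])
      have h2 : v ∉ l := by intro hm; exact h (by simp [hm])
      rw [List.cons_append, PySem.List.index?_cons_of_ne _ hx, ih h2, Option.map_map]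
      congr 1
      funext j
      simp
      omega
-- step lemmas for aStep
theorem aStep_not_mem (tt : Int) (s : List Int) (X Y : List (List Int)) (il : List Nat)
    (h : s ∉ X) : aStep tt (X, Y, il) s = (X ++ [s], Y ++ [[tt]], il) := by
  simp only [aStep]
  rw [if_pos h]

theorem aStep_mem (tt : Int) (s : List Int) (X Y : List (List Int)) (il : List Nat)
    (h : s ∈ X) : aStep tt (X, Y, il) s =
      (X, (if ((Y.getD ((PySem.List.index? X s).getD 0) []).length % 2 = 0) then
             Y.set ((PySem.List.index? X s).getD 0)
               (Y.getD ((PySem.List.index? X s).getD 0) [] ++ [tt])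
           else Y), il ++ [(PySem.List.index? X s).getD 0]) := by
  simp only [aStep]
  rw [if_neg (not_not_intro h)]
  split_ifs <;> rfl

-- step lemmas for tlStep
theorem tlStep_not_mem (sl : List (List Int)) (tt : Int) (tl : List (List Int)) (s : List Int)
    (h : s ∉ sl) : tlStep sl tt tl s = tl := by
  simp only [tlStep]
  rw [if_neg h]

theorem tlStep_mem (sl : List (List Int)) (tt : Int) (tl : List (List Int)) (s : List Int)
    (h : s ∈ sl) : tlStep sl tt tl s =
      (if ((tl.getD ((PySem.List.index? sl s).getD 0) []).length % 2 = 0) then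
         tl.set ((PySem.List.index? sl s).getD 0)
           (tl.getD ((PySem.List.index? sl s).getD 0) [] ++ [tt])
       else tl) := by
  simp only [tlStep]
  rw [if_pos h]

theorem tlStep_length (sl : List (List Int)) (tt : Int) (tl : List (List Int)) (s : List Int) :
    (tlStep sl tt tl s).length = tl.length := by
  by_cases h : s ∈ sl
  · rw [tlStep_mem sl tt tl s h]
    split_ifs <;> simp
  · rw [tlStep_not_mem sl tt tl s h]
theorem tlF_cons (sl : List (List Int)) (tt : Int) (s : List Int) (ts tl : List (List Int)) :
    tlF sl tt (s :: ts) tl = tlF sl tt ts (tlStep sl tt tl s) := by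
  simp only [tlF, List.foldl_cons]

theorem tlF_length (sl : List (List Int)) (tt : Int) :
    ∀ (ts tl : List (List Int)), (tlF sl tt ts tl).length = tl.length := by
  intro ts
  induction ts with
  | nil => intro tl; rfl
  | cons s ts ih => intro tl; rw [tlF_cons, ih, tlStep_length]

theorem nsF_cons_skip (sl : List (List Int)) (s : List Int) (ts ns : List (List Int))
    (h : s ∈ sl ∨ s ∈ ns) : nsF sl (s :: ts) ns = nsF sl ts ns := by
  simp only [nsF, List.foldl_cons]
  rw [if_pos h]

theorem nsF_cons_new (sl : List (List Int)) (s : List Int) (ts ns : List (List Int))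
    (h : ¬ (s ∈ sl ∨ s ∈ ns)) : nsF sl (s :: ts) ns = nsF sl ts (ns ++ [s]) := by
  simp only [nsF, List.foldl_cons]
  rw [if_neg h]

theorem mtch_cons_not_mem (sl : List (List Int)) (s : List Int) (ts : List (List Int)) (v : Nat)
    (h1 : s ∉ sl) : mtchP sl (s :: ts) v ↔ mtchP sl ts v := by
  constructor
  · rintro ⟨s', hs', hsl', hfi'⟩
    rcases List.mem_cons.mp hs' with rfl | hs'
    · exact absurd hsl' h1
    · exact ⟨s', hs', hsl', hfi'⟩
  · rintro ⟨s', hs', hsl', hfi'⟩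
    exact ⟨s', List.mem_cons_of_mem _ hs', hsl', hfi'⟩

theorem mtch_cons_mem (sl : List (List Int)) (s : List Int) (ts : List (List Int)) (v k : Nat)
    (h1 : s ∈ sl) (hk : PySem.List.index? sl s = some k) :
    mtchP sl (s :: ts) v ↔ (v = k ∨ mtchP sl ts v) := by
  constructor
  · rintro ⟨s', hs', hsl', hfi'⟩
    rcases List.mem_cons.mp hs' with rfl | hs'
    · rw [hk] at hfi'
      exact Or.inl (by simpa using hfi'.symm)
    · exact Or.inr ⟨s', hs', hsl', hfi'⟩
  · rintro (rfl | ⟨s', hs', hsl', hfi'⟩)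
    · exact ⟨s, List.mem_cons_self, h1, by rw [hk]; rfl⟩
    · exact ⟨s', List.mem_cons_of_mem _ hs', hsl', hfi'⟩

-- characterization of A's first loop
theorem aLoop1_char (tt : Int) (sl : List (List Int)) :
    ∀ (ts ns tl : List (List Int)) (il : List Nat), sl.length ≤ tl.length →
    (tl.length = sl.length ∨
      ((ts.filter (fun s => decide (s ∉ sl))).Nodup ∧ ∀ s ∈ ts, s ∉ sl → s ∉ ns)) →
    ∃ il', ts.foldl (aStep tt) (sl ++ ns, tl ++ ns.map (fun _ => [tt]), il)
          = (sl ++ nsF sl ts ns, tlF sl tt ts tl ++ (nsF sl ts ns).map (fun _ => [tt]), il')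
        ∧ ∀ v, v < sl.length → (v ∈ il' ↔ v ∈ il ∨ mtchP sl ts v) := by
  intro ts
  induction ts with
  | nil =>
      intro ns tl il h _
      refine ⟨il, by simp [nsF, tlF], ?_⟩
      intro v hv
      simp [mtchP]
  | cons s ts ih =>
      intro ns tl il h hinv
      by_cases h1 : s ∈ sl
      · -- matched against an original simplex
        have hmem : s ∈ sl ++ ns := List.mem_append_left _ h1
        obtain ⟨k, hk⟩ := Option.isSome_iff_exists.mp ((PySem.List.index?_isSome_iff sl s).mpr h1)
        obtain ⟨hklt, hget, -⟩ := PySem.List.getElem_of_index?_eq_some hk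
        have hfi : (PySem.List.index? sl s).getD 0 = k := by rw [hk]; rfl
        have hidx : (PySem.List.index? (sl ++ ns) s).getD 0 = k := by
          rw [PySem.List.index?_append_of_mem ns h1, hk]; rfl
        have hklt' : k < tl.length := by omega
        have hgetD : (tl ++ ns.map (fun _ => [tt])).getD k [] = tl.getD k [] :=
          List.getD_append _ _ _ _ hklt'
        have htl : tlStep sl tt tl s =
            (if (tl.getD k []).length % 2 = 0 then tl.set k (tl.getD k [] ++ [tt]) else tl) := by
          rw [tlStep_mem sl tt tl s h1, hfi]
        rw [List.foldl_cons, aStep_mem tt s _ _ il hmem, hidx, hgetD]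
        by_cases hpar : (tl.getD k []).length % 2 = 0
        · rw [if_pos hpar]
          have hset : (tl ++ ns.map (fun _ => [tt])).set k (tl.getD k [] ++ [tt])
              = tl.set k (tl.getD k [] ++ [tt]) ++ ns.map (fun _ => [tt]) := by
            rw [List.set_append, if_pos hklt']
          rw [hset]
          have hinv' : (tl.set k (tl.getD k [] ++ [tt])).length = sl.length ∨
              ((ts.filter (fun s => decide (s ∉ sl))).Nodup ∧ ∀ s' ∈ ts, s' ∉ sl → s' ∉ ns) := by
            rcases hinv with he | ⟨hd, hf⟩
            · exact Or.inl (by simp [he])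
            · refine Or.inr ⟨?_, fun s' hs' => hf s' (List.mem_cons_of_mem _ hs')⟩
              have : (List.filter (fun s => decide (s ∉ sl)) (s :: ts))
                  = ts.filter (fun s => decide (s ∉ sl)) := by
                simp [List.filter_cons, h1]
              rw [← this]; exact hd
          obtain ⟨il', heq, hmem'⟩ := ih ns (tl.set k (tl.getD k [] ++ [tt])) (il ++ [k])
            (by simpa using h) hinv'
          refine ⟨il', ?_, ?_⟩
          · rw [heq, nsF_cons_skip sl s ts ns (Or.inl h1), tlF_cons, htl, if_pos hpar]
          · intro v hv
            rw [hmem' v hv, mtch_cons_mem sl s ts v k h1 hk]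
            constructor
            · rintro (hvi | hm)
              · rcases List.mem_append.mp hvi with hvi | hvi
                · exact Or.inl hvi
                · have hvk : v = k := by simpa using hvi
                  exact Or.inr (Or.inl hvk)
              · exact Or.inr (Or.inr hm)
            · rintro (hvi | hvk | hm)
              · exact Or.inl (List.mem_append_left _ hvi)
              · exact Or.inl (List.mem_append_right _ (by simp [hvk]))
              · exact Or.inr hm
        · rw [if_neg hpar]
          have hinv' : tl.length = sl.length ∨
              ((ts.filter (fun s => decide (s ∉ sl))).Nodup ∧ ∀ s' ∈ ts, s' ∉ sl → s' ∉ ns) := by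
            rcases hinv with he | ⟨hd, hf⟩
            · exact Or.inl he
            · refine Or.inr ⟨?_, fun s' hs' => hf s' (List.mem_cons_of_mem _ hs')⟩
              have : (List.filter (fun s => decide (s ∉ sl)) (s :: ts))
                  = ts.filter (fun s => decide (s ∉ sl)) := by
                simp [List.filter_cons, h1]
              rw [← this]; exact hd
          obtain ⟨il', heq, hmem'⟩ := ih ns tl (il ++ [k]) h hinv'
          refine ⟨il', ?_, ?_⟩
          · rw [heq, nsF_cons_skip sl s ts ns (Or.inl h1), tlF_cons, htl, if_neg hpar]
          · intro v hv
            rw [hmem' v hv, mtch_cons_mem sl s ts v k h1 hk]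
            constructor
            · rintro (hvi | hm)
              · rcases List.mem_append.mp hvi with hvi | hvi
                · exact Or.inl hvi
                · have hvk : v = k := by simpa using hvi
                  exact Or.inr (Or.inl hvk)
              · exact Or.inr (Or.inr hm)
            · rintro (hvi | hvk | hm)
              · exact Or.inl (List.mem_append_left _ hvi)
              · exact Or.inl (List.mem_append_right _ (by simp [hvk]))
              · exact Or.inr hm
      · by_cases h2 : s ∈ ns
        · -- duplicate of an already-appended new simplex (Pre_ forces equal lengths here)
          have heql : tl.length = sl.length := by
            rcases hinv with he | ⟨-, hf⟩
            · exact he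
            · exact absurd h2 (hf s List.mem_cons_self h1)
          have hmem : s ∈ sl ++ ns := List.mem_append_right _ h2
          obtain ⟨j, hj⟩ := Option.isSome_iff_exists.mp ((PySem.List.index?_isSome_iff ns s).mpr h2)
          obtain ⟨hjlt, -, -⟩ := PySem.List.getElem_of_index?_eq_some hj
          have hidx : (PySem.List.index? (sl ++ ns) s).getD 0 = sl.length + j := by
            rw [index?_append_not_mem sl ns s h1, hj]; rfl
          have hgetD : (tl ++ ns.map (fun _ => [tt])).getD (sl.length + j) [] = [tt] := by
            rw [List.getD_append_right _ _ _ _ (by omega)]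
            have hj2 : sl.length + j - tl.length = j := by omega
            rw [hj2, List.getD_eq_getElem _ _ (by simpa using hjlt)]
            simp
          rw [List.foldl_cons, aStep_mem tt s _ _ il hmem, hidx, hgetD]
          rw [if_neg (by simp)]
          obtain ⟨il', heq, hmem'⟩ := ih ns tl (il ++ [sl.length + j]) h (Or.inl heql)
          refine ⟨il', ?_, ?_⟩
          · rw [heq, nsF_cons_skip sl s ts ns (Or.inr h2), tlF_cons, tlStep_not_mem sl tt tl s h1]
          · intro v hv
            rw [hmem' v hv, mtch_cons_not_mem sl s ts v h1]
            constructor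
            · rintro (hvi | hm)
              · rcases List.mem_append.mp hvi with hvi | hvi
                · exact Or.inl hvi
                · have : v = sl.length + j := by simpa using hvi
                  omega
              · exact Or.inr hm
            · rintro (hvi | hm)
              · exact Or.inl (List.mem_append_left _ hvi)
              · exact Or.inr hm
        · -- genuinely new simplex: appended
          have hmem : s ∉ sl ++ ns := fun hc => (List.mem_append.mp hc).elim h1 h2
          rw [List.foldl_cons, aStep_not_mem tt s _ _ il hmem]
          have hre : ((sl ++ ns) ++ [s], (tl ++ ns.map (fun _ => [tt])) ++ [[tt]], il)
              = (sl ++ (ns ++ [s]), tl ++ (ns ++ [s]).map (fun _ => [tt]), il) := by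
            simp
          rw [hre]
          have hinv' : tl.length = sl.length ∨
              ((ts.filter (fun s => decide (s ∉ sl))).Nodup ∧
                ∀ s' ∈ ts, s' ∉ sl → s' ∉ ns ++ [s]) := by
            rcases hinv with he | ⟨hd, hf⟩
            · exact Or.inl he
            · have hfe : (List.filter (fun s => decide (s ∉ sl)) (s :: ts))
                  = s :: ts.filter (fun s => decide (s ∉ sl)) := by
                simp [List.filter_cons, h1]
              rw [hfe, List.nodup_cons] at hd
              refine Or.inr ⟨hd.2, ?_⟩
              intro s' hs' hsl'
              have hne : s' ≠ s := by
                intro hss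
                exact hd.1 (hss ▸ List.mem_filter.mpr ⟨hs', by simpa using hsl'⟩)
              simp [hf s' (List.mem_cons_of_mem _ hs') hsl', hne]
          obtain ⟨il', heq, hmem'⟩ := ih (ns ++ [s]) tl il h hinv'
          refine ⟨il', ?_, ?_⟩
          · rw [heq, nsF_cons_new sl s ts ns (by push_neg; exact ⟨h1, h2⟩), tlF_cons,
              tlStep_not_mem sl tt tl s h1]
          · intro v hv
            rw [hmem' v hv, mtch_cons_not_mem sl s ts v h1]
-- Bool form of the match predicate (for use inside if-conditions)
def mtchb (sl ts : List (List Int)) (v : Nat) : Bool :=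
  ts.any (fun s => decide (s ∈ sl) && ((PySem.List.index? sl s).getD 0 == v))

theorem mtchb_iff (sl ts : List (List Int)) (v : Nat) :
    mtchb sl ts v = true ↔ mtchP sl ts v := by
  simp [mtchb, mtchP, List.any_eq_true]

theorem mtchb_cons_not_mem (sl : List (List Int)) (s : List Int) (ts : List (List Int)) (v : Nat)
    (h1 : s ∉ sl) : mtchb sl (s :: ts) v = mtchb sl ts v := by
  simp [mtchb, h1]

theorem mtchb_cons_mem (sl : List (List Int)) (s : List Int) (ts : List (List Int)) (v k : Nat)
    (h1 : s ∈ sl) (hk : PySem.List.index? sl s = some k) :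
    mtchb sl (s :: ts) v = ((k == v) || mtchb sl ts v) := by
  simp only [mtchb, List.any_cons]
  rw [hk]
  simp [h1]

-- pointwise value of the shadow time-list fold
theorem tlF_getD (sl : List (List Int)) (tt : Int) :
    ∀ (ts tl : List (List Int)), sl.length ≤ tl.length → ∀ v, v < sl.length →
    (tlF sl tt ts tl).getD v [] =
      if mtchb sl ts v ∧ (tl.getD v []).length % 2 = 0 then tl.getD v [] ++ [tt]
      else tl.getD v [] := by
  intro ts
  induction ts with
  | nil =>
      intro tl h v hv
      rw [if_neg (fun hc => by simpa [mtchb] using hc.1)]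
      rfl
  | cons s ts ih =>
      intro tl h v hv
      by_cases h1 : s ∈ sl
      · obtain ⟨k, hk⟩ := Option.isSome_iff_exists.mp ((PySem.List.index?_isSome_iff sl s).mpr h1)
        have hfi : (PySem.List.index? sl s).getD 0 = k := by rw [hk]; rfl
        obtain ⟨hklt, hget, -⟩ := PySem.List.getElem_of_index?_eq_some hk
        have htl : tlStep sl tt tl s =
            (if (tl.getD k []).length % 2 = 0 then tl.set k (tl.getD k [] ++ [tt]) else tl) := by
          rw [tlStep_mem sl tt tl s h1, hfi]
        rw [tlF_cons, htl, mtchb_cons_mem sl s ts v k h1 hk]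
        by_cases hpar : (tl.getD k []).length % 2 = 0
        · rw [if_pos hpar, ih (tl.set k (tl.getD k [] ++ [tt])) (by simpa using h) v hv, getD_set_lem]
          by_cases hvk : v = k
          · subst hvk
            rw [if_pos (⟨rfl, by omega⟩ : v = v ∧ v < tl.length)]
            rw [if_neg (fun hc => by
              have h2 := hc.2
              simp only [List.length_append, List.length_cons, List.length_nil] at h2
              omega : ¬((mtchb sl ts v) = true ∧ (tl.getD v [] ++ [tt]).length % 2 = 0))]
            rw [if_pos (⟨by simp, hpar⟩ : ((v == v) || mtchb sl ts v) = true ∧ (tl.getD v []).length % 2 = 0)]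
          · rw [if_neg ((fun hc => hvk hc.1.symm) : ¬(k = v ∧ k < tl.length))]
            have hbv : (k == v) = false := beq_eq_false_iff_ne.mpr (fun h' => hvk h'.symm)
            rw [hbv, Bool.false_or]
        · rw [if_neg hpar, ih tl h v hv]
          by_cases hvk : v = k
          · subst hvk
            rw [if_neg ((fun hc => hpar hc.2) : ¬((mtchb sl ts v) = true ∧ (tl.getD v []).length % 2 = 0))]
            rw [if_neg ((fun hc => hpar hc.2) : ¬(((v == v) || mtchb sl ts v) = true ∧ (tl.getD v []).length % 2 = 0))]
          · have hbv : (k == v) = false := beq_eq_false_iff_ne.mpr (fun h' => hvk h'.symm)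
            rw [hbv, Bool.false_or]
      · rw [tlF_cons, tlStep_not_mem sl tt tl s h1, ih tl h v hv,
          mtchb_cons_not_mem sl s ts v h1]

-- indices past the original simplex range are untouched by the shadow fold
theorem tlF_getD_high (sl : List (List Int)) (tt : Int) :
    ∀ (ts tl : List (List Int)) (v : Nat), sl.length ≤ v →
    (tlF sl tt ts tl).getD v [] = tl.getD v [] := by
  intro ts
  induction ts with
  | nil => intro tl v _; rfl
  | cons s ts ih =>
      intro tl v hv
      by_cases h1 : s ∈ sl
      · obtain ⟨k, hk⟩ := Option.isSome_iff_exists.mp ((PySem.List.index?_isSome_iff sl s).mpr h1)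
        obtain ⟨hklt, -, -⟩ := PySem.List.getElem_of_index?_eq_some hk
        have hfi : (PySem.List.index? sl s).getD 0 = k := by rw [hk]; rfl
        rw [tlF_cons, tlStep_mem sl tt tl s h1, hfi]
        split_ifs with hpar
        · rw [ih _ v hv, getD_set_lem, if_neg (by rintro ⟨he, -⟩; omega)]
        · exact ih tl v hv
      · rw [tlF_cons, tlStep_not_mem sl tt tl s h1]
        exact ih tl v hv

-- generic: a fold of index-local updates over a nodup index list, pointwise
theorem foldl_pointwise (g : List (List Int) → Nat → List (List Int))
    (F : Nat → List Int → List Int)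
    (hlen : ∀ tl v, (g tl v).length = tl.length)
    (hg : ∀ tl v w, v < tl.length →
      (g tl v).getD w [] = if w = v then F v (tl.getD v []) else tl.getD w []) :
    ∀ (rs : List Nat) (tl : List (List Int)), rs.Nodup → (∀ r ∈ rs, r < tl.length) →
    ∀ w, (rs.foldl g tl).getD w [] = if w ∈ rs then F w (tl.getD w []) else tl.getD w [] := by
  intro rs
  induction rs with
  | nil => intro tl _ _ w; simp
  | cons r rs ih =>
      intro tl hnd hlt w
      have hr : r < tl.length := hlt r List.mem_cons_self
      have hnd' : rs.Nodup := (List.nodup_cons.mp hnd).2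
      have hlt' : ∀ x ∈ rs, x < (g tl r).length := by
        intro x hx; rw [hlen]; exact hlt x (List.mem_cons_of_mem _ hx)
      rw [List.foldl_cons, ih (g tl r) hnd' hlt' w]
      by_cases hw : w ∈ rs
      · have hwr : w ≠ r := fun he => (List.nodup_cons.mp hnd).1 (he ▸ hw)
        rw [if_pos hw, if_pos (List.mem_cons_of_mem _ hw), hg tl r w hr, if_neg hwr]
      · rw [if_neg hw, hg tl r w hr]
        by_cases hwr : w = r
        · subst hwr
          rw [if_pos rfl, if_pos List.mem_cons_self]
        · rw [if_neg hwr, if_neg (by simp [hwr, hw])]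

theorem foldl_pointwise_length (g : List (List Int) → Nat → List (List Int))
    (hlen : ∀ tl v, (g tl v).length = tl.length) :
    ∀ (rs : List Nat) (tl : List (List Int)), (rs.foldl g tl).length = tl.length := by
  intro rs
  induction rs with
  | nil => intro tl; rfl
  | cons r rs ih => intro tl; rw [List.foldl_cons, ih, hlen]

-- B's second pass
theorem bStep2_skip (tt : Int) (s : List Int) (X Y : List (List Int)) (h : s ∈ X) :
    bStep2 tt (X, Y) s = (X, Y) := by
  simp only [bStep2]
  rw [if_neg (not_not_intro h)]

theorem bStep2_new (tt : Int) (s : List Int) (X Y : List (List Int)) (h : s ∉ X) :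
    bStep2 tt (X, Y) s = (X ++ [s], Y ++ [[tt]]) := by
  simp only [bStep2]
  rw [if_pos h]

theorem bLoop2_char (tt : Int) (sl : List (List Int)) :
    ∀ (ts ns tlX : List (List Int)),
    ts.foldl (bStep2 tt) (sl ++ ns, tlX ++ ns.map (fun _ => [tt]))
      = (sl ++ nsF sl ts ns, tlX ++ (nsF sl ts ns).map (fun _ => [tt])) := by
  intro ts
  induction ts with
  | nil => intro ns tlX; simp [nsF]
  | cons s ts ih =>
      intro ns tlX
      by_cases hm : s ∈ sl ∨ s ∈ ns
      · rw [List.foldl_cons, bStep2_skip tt s _ _ (List.mem_append.mpr hm), ih,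
          nsF_cons_skip sl s ts ns hm]
      · push_neg at hm
        rw [List.foldl_cons, bStep2_new tt s _ _ (fun hc => (List.mem_append.mp hc).elim hm.1 hm.2)]
        have hre : ((sl ++ ns) ++ [s], (tlX ++ ns.map (fun _ => [tt])) ++ [[tt]])
            = (sl ++ (ns ++ [s]), tlX ++ (ns ++ [s]).map (fun _ => [tt])) := by
          simp
        rw [hre, ih, nsF_cons_new sl s ts ns (by push_neg; exact hm)]

-- a value occurring at two positions has count ≥ 2
theorem count_ge_two (l : List (List Int)) (k v : Nat) (hkv : k < v) (hv : v < l.length)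
    (hx : l[k]'(by omega) = l[v]) : 2 ≤ l.count (l[v]) := by
  have h1 : l[v] ∈ l.take v := by
    have hg : (l.take v)[k]'(by simp; omega) = l[k]'(by omega) := List.getElem_take
    rw [← hx, ← hg]
    exact List.getElem_mem _
  have h2 : l[v] ∈ l.drop v := by
    have hg : (l.drop v)[0]'(by simp; omega) = l[v + 0]'(by omega) := List.getElem_drop
    simpa using hg ▸ List.getElem_mem _
  have hcnt : (l.take v ++ l.drop v).count (l[v]'hv)
      = (l.take v).count (l[v]'hv) + (l.drop v).count (l[v]'hv) := List.count_append
  rw [List.take_append_drop] at hcnt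
  have hc1 : 1 ≤ (l.take v).count (l[v]'hv) := List.one_le_count_iff.mpr h1
  have hc2 : 1 ≤ (l.drop v).count (l[v]'hv) := List.one_le_count_iff.mpr h2
  omega

-- a duplicate-free filtered list pins positions of filtered values
theorem filter_nodup_getElem_eq (l : List (List Int)) (p : List Int → Bool)
    (hnd : (l.filter p).Nodup) (k v : Nat) (hk : k < l.length) (hv : v < l.length)
    (hx : l[k] = l[v]) (hp : p (l[v]) = true) : k = v := by
  have hc : l.count (l[v]) ≤ 1 := by
    have h1 := List.nodup_iff_count_le_one.mp hnd (l[v])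
    rwa [List.count_filter hp] at h1
  rcases Nat.lt_trichotomy k v with h | h | h
  · exact absurd (count_ge_two l k v h hv hx) (by omega)
  · exact h
  · have hx' : l[v]'hv = l[k]'hk := hx.symm
    have := count_ge_two l v k h hk hx'
    rw [← hx] at hc
    omega

-- when simplices of simplex_t occur at most once in sl, B's membership condition
-- agrees with A's match predicate
theorem mtch_iff (sl ts : List (List Int)) (v : Nat) (hv : v < sl.length)
    (hnd : (sl.filter (fun s => decide (s ∈ ts))).Nodup) :
    mtchP sl ts v ↔ sl.getD v [] ∈ ts := by
  constructor
  · rintro ⟨s, hs, hsl, hfi⟩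
    obtain ⟨k, hk⟩ := Option.isSome_iff_exists.mp ((PySem.List.index?_isSome_iff sl s).mpr hsl)
    obtain ⟨hklt, hget, -⟩ := PySem.List.getElem_of_index?_eq_some hk
    have hkv : k = v := by rw [hk] at hfi; simpa using hfi
    subst hkv
    have hgv : sl.getD k [] = s := by rw [List.getD_eq_getElem _ _ hklt]; exact hget
    rw [hgv]
    exact hs
  · intro hmem
    have hvmem : sl.getD v [] ∈ sl := by
      rw [List.getD_eq_getElem _ _ hv]; exact List.getElem_mem hv
    obtain ⟨k, hk⟩ := Option.isSome_iff_exists.mp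
      ((PySem.List.index?_isSome_iff sl (sl.getD v [])).mpr hvmem)
    obtain ⟨hklt, hget, -⟩ := PySem.List.getElem_of_index?_eq_some hk
    have hxkv : sl[k]'hklt = sl[v]'hv := by
      rw [hget, List.getD_eq_getElem _ _ hv]
    have hpv : (fun s => decide (s ∈ ts)) (sl[v]'hv) = true := by
      simp only [decide_eq_true_eq]
      rwa [List.getD_eq_getElem _ _ hv] at hmem
    have hkv : k = v := filter_nodup_getElem_eq sl _ hnd k v hklt hv hxkv hpv
    refine ⟨sl.getD v [], hmem, hvmem, ?_⟩
    rw [hk]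
    simpa using hkv

-- the per-index transforms of the two closing passes
def FA (il : List Nat) (tt : Int) (v : Nat) (e : List Int) : List Int :=
  if v ∉ il then (if e.length % 2 ≠ 0 then e ++ [tt - 1] else e) else e

def FB (ts sl : List (List Int)) (tt : Int) (v : Nat) (e : List Int) : List Int :=
  if sl.getD v [] ∈ ts then
    (if e.length % 2 = 0 then e ++ [tt] else e)
  else
    (if e.length % 2 = 1 then e ++ [tt - 1] else e)

theorem aStep2_getD (tt : Int) (il : List Nat) (tlx : List (List Int)) (v w : Nat)
    (hv : v < tlx.length) :
    (aStep2 tt il tlx v).getD w [] =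
      if w = v then FA il tt v (tlx.getD v []) else tlx.getD w [] := by
  simp only [aStep2, FA]
  by_cases hmem : v ∈ il
  · rw [if_neg (not_not_intro hmem), if_neg (not_not_intro hmem)]
    by_cases hw : w = v
    · subst hw; rw [if_pos rfl]
    · rw [if_neg hw]
  · rw [if_pos hmem, if_pos hmem]
    by_cases hpar : (tlx.getD v []).length % 2 ≠ 0
    · rw [if_pos hpar, if_pos hpar, getD_set_lem]
      by_cases hw : w = v
      · subst hw; rw [if_pos ⟨rfl, hv⟩, if_pos rfl]
      · rw [if_neg (by rintro ⟨he, -⟩; exact hw he.symm), if_neg hw]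
    · rw [if_neg hpar, if_neg hpar]
      by_cases hw : w = v
      · subst hw; rw [if_pos rfl]
      · rw [if_neg hw]

theorem aStep2_length (tt : Int) (il : List Nat) (tlx : List (List Int)) (v : Nat) :
    (aStep2 tt il tlx v).length = tlx.length := by
  simp only [aStep2]
  split_ifs <;> simp

theorem bStep1_getD (ts sl : List (List Int)) (tt : Int) (tlx : List (List Int)) (v w : Nat)
    (hv : v < tlx.length) :
    (bStep1 ts sl tt tlx v).getD w [] =
      if w = v then FB ts sl tt v (tlx.getD v []) else tlx.getD w [] := by
  simp only [bStep1, FB]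
  by_cases hm : sl.getD v [] ∈ ts
  · rw [if_pos hm, if_pos hm]
    by_cases hpar : (tlx.getD v []).length % 2 = 0
    · rw [if_pos hpar, if_pos hpar, getD_set_lem]
      by_cases hw : w = v
      · subst hw; rw [if_pos ⟨rfl, hv⟩, if_pos rfl]
      · rw [if_neg (by rintro ⟨he, -⟩; exact hw he.symm), if_neg hw]
    · rw [if_neg hpar, if_neg hpar]
      by_cases hw : w = v
      · subst hw; rw [if_pos rfl]
      · rw [if_neg hw]
  · rw [if_neg hm, if_neg hm]
    by_cases hpar : (tlx.getD v []).length % 2 = 1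
    · rw [if_pos hpar, if_pos hpar, getD_set_lem]
      by_cases hw : w = v
      · subst hw; rw [if_pos ⟨rfl, hv⟩, if_pos rfl]
      · rw [if_neg (by rintro ⟨he, -⟩; exact hw he.symm), if_neg hw]
    · rw [if_neg hpar, if_neg hpar]
      by_cases hw : w = v
      · subst hw; rw [if_pos rfl]
      · rw [if_neg hw]

theorem bStep1_length (ts sl : List (List Int)) (tt : Int) (tlx : List (List Int)) (v : Nat) :
    (bStep1 ts sl tt tlx v).length = tlx.length := by
  simp only [bStep1]
  split_ifs <;> simp

-- ===== VERDICT (by name: the statement is the Claim_ definition above) =====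

theorem BarCodesUpdate_spec : Claim_equal_BarCodesUpdate := by
  intro sl tl ts tt _ hpre
  obtain ⟨hle, hnd, hdis⟩ := hpre
  unfold Spec_BarCodesUpdate
  have hinv0 : tl.length = sl.length ∨
      ((ts.filter (fun s => decide (s ∉ sl))).Nodup ∧
        ∀ s ∈ ts, s ∉ sl → s ∉ ([] : List (List Int))) := by
    rcases hdis with he | hd
    · exact Or.inl he
    · exact Or.inr ⟨hd, by simp⟩
  obtain ⟨il', heq, hil⟩ := aLoop1_char tt sl ts [] tl [] hle hinv0
  simp only [List.append_nil, List.map_nil] at heq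
  have hA : BarCodesUpdate sl tl ts tt
      = (sl ++ nsF sl ts [],
         (List.range sl.length).foldl (aStep2 tt il')
           (tlF sl tt ts tl ++ (nsF sl ts []).map (fun _ => [tt]))) := by
    simp only [BarCodesUpdate, heq]
  have hB2 := bLoop2_char tt sl ts [] ((List.range sl.length).foldl (bStep1 ts sl tt) tl)
  simp only [List.append_nil, List.map_nil] at hB2
  have hB : BarCodesUpdate_alt sl tl ts tt
      = (sl ++ nsF sl ts [],
         (List.range sl.length).foldl (bStep1 ts sl tt) tl
           ++ (nsF sl ts []).map (fun _ => [tt])) := by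
    simp only [BarCodesUpdate_alt, hB2]
  rw [hA, hB]
  refine Prod.ext rfl ?_
  have htlF : (tlF sl tt ts tl).length = tl.length := tlF_length sl tt ts tl
  have hXlen : (tlF sl tt ts tl ++ (nsF sl ts []).map (fun _ => [tt])).length
      = tl.length + (nsF sl ts []).length := by
    rw [List.length_append, htlF, List.length_map]
  have hBlen : ((List.range sl.length).foldl (bStep1 ts sl tt) tl).length = tl.length :=
    foldl_pointwise_length _ (bStep1_length ts sl tt) _ tl
  have hApw := foldl_pointwise (aStep2 tt il') (FA il' tt) (aStep2_length tt il')
    (aStep2_getD tt il') (List.range sl.length)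
    (tlF sl tt ts tl ++ (nsF sl ts []).map (fun _ => [tt])) (List.nodup_range)
    (by intro r hr; rw [hXlen]; have := List.mem_range.mp hr; omega)
  have hBpw := foldl_pointwise (bStep1 ts sl tt) (FB ts sl tt) (bStep1_length ts sl tt)
    (bStep1_getD ts sl tt) (List.range sl.length) tl (List.nodup_range)
    (by intro r hr; have := List.mem_range.mp hr; omega)
  apply List.ext_getElem
  · rw [foldl_pointwise_length _ (aStep2_length tt il'), hXlen, List.length_append, hBlen,
      List.length_map]
  · intro i hi1 hi2
    rw [← List.getD_eq_getElem _ [] hi1, ← List.getD_eq_getElem _ [] hi2, hApw i]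
    by_cases hi : i < sl.length
    · rw [if_pos (List.mem_range.mpr hi)]
      have hXi : (tlF sl tt ts tl ++ (nsF sl ts []).map (fun _ => [tt])).getD i []
          = (tlF sl tt ts tl).getD i [] := List.getD_append _ _ _ _ (by omega)
      have hRi : ((List.range sl.length).foldl (bStep1 ts sl tt) tl
            ++ (nsF sl ts []).map (fun _ => [tt])).getD i []
          = ((List.range sl.length).foldl (bStep1 ts sl tt) tl).getD i [] :=
        List.getD_append _ _ _ _ (by omega)
      rw [hXi, hRi, hBpw i, if_pos (List.mem_range.mpr hi),
        tlF_getD sl tt ts tl hle i hi]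
      have hil'i : i ∈ il' ↔ mtchP sl ts i := by rw [hil i hi]; simp
      have hFBc : sl.getD i [] ∈ ts ↔ mtchP sl ts i := (mtch_iff sl ts i hi hnd).symm
      by_cases hm : mtchP sl ts i
      · have hiil : i ∈ il' := hil'i.mpr hm
        have hmb : mtchb sl ts i = true := (mtchb_iff sl ts i).mpr hm
        by_cases hpar : (tl.getD i []).length % 2 = 0
        · rw [if_pos (⟨hmb, hpar⟩ : mtchb sl ts i = true ∧ (tl.getD i []).length % 2 = 0)]
          simp only [FA, FB]
          rw [if_neg (not_not_intro hiil), if_pos (hFBc.mpr hm), if_pos hpar]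
        · rw [if_neg ((fun hc => hpar hc.2) : ¬(mtchb sl ts i = true ∧ (tl.getD i []).length % 2 = 0))]
          simp only [FA, FB]
          rw [if_neg (not_not_intro hiil), if_pos (hFBc.mpr hm), if_neg hpar]
      · have hiil : i ∉ il' := fun hc => hm (hil'i.mp hc)
        rw [if_neg ((fun hc => hm ((mtchb_iff sl ts i).mp hc.1)) :
          ¬(mtchb sl ts i = true ∧ (tl.getD i []).length % 2 = 0))]
        simp only [FA, FB]
        rw [if_pos hiil, if_neg (fun hc => hm (hFBc.mp hc))]
        by_cases hpar : (tl.getD i []).length % 2 = 1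
        · rw [if_pos (by omega), if_pos hpar]
        · rw [if_neg (by omega), if_neg hpar]
    · rw [if_neg (by simpa using hi)]
      by_cases him : i < tl.length
      · have hXi : (tlF sl tt ts tl ++ (nsF sl ts []).map (fun _ => [tt])).getD i []
            = (tlF sl tt ts tl).getD i [] := List.getD_append _ _ _ _ (by omega)
        have hRi : ((List.range sl.length).foldl (bStep1 ts sl tt) tl
              ++ (nsF sl ts []).map (fun _ => [tt])).getD i []
            = ((List.range sl.length).foldl (bStep1 ts sl tt) tl).getD i [] :=
          List.getD_append _ _ _ _ (by omega)
        rw [hXi, hRi, hBpw i, if_neg (by simpa using hi),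
          tlF_getD_high sl tt ts tl i (by omega)]
      · rw [List.getD_append_right _ _ _ _ (by omega),
          List.getD_append_right _ _ _ _ (by omega), htlF, hBlen]
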